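-- pv_equiv track=rewrite | github.com/najicham/nba-stats-scraper | tests/property/test_player_name_properties.py | extract_suffix
-- ===== SOURCE A (Python) =====
-- def extract_suffix(name: str):
--     """Extract suffix from player name."""
--     if not name:
--         return "", None
--
--     suffixes = [
--         'Junior', 'Senior',
--         'Jr.', 'Sr.',
--         'III', 'IV', 'V', 'II',
--         '3rd', '4th', '5th', '2nd',
--         'Jr', 'Sr',
--     ]
--
--     name_trimmed = name.strip()
--
--     for suffix in suffixes:
--         if name_trimmed.lower().endswith(suffix.lower()):
--             base_name = name_trimmed[:-len(suffix)].strip()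
--             return base_name, suffix
--
--     return name_trimmed, None
-- ===== SOURCE B (Python) =====
-- _SUFFIX_MAP = {
--     'junior': 'Junior', 'senior': 'Senior',
--     'jr.': 'Jr.', 'sr.': 'Sr.', 'iii': 'III',
--     '3rd': '3rd', '4th': '4th', '5th': '5th', '2nd': '2nd',
--     'iv': 'IV', 'ii': 'II', 'jr': 'Jr', 'sr': 'Sr',
--     'v': 'V',
-- }
--
--
-- def extract_suffix(name: str):
--     """Extract suffix from player name: longest known suffix wins (one dict lookup per length)."""
--     if not name:
--         return "", None
--     trimmed = name.strip()
--     low = trimmed.lower()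
--     n = len(low)
--     for k in (6, 3, 2, 1):
--         if k <= n:
--             canon = _SUFFIX_MAP.get(low[n - k:])
--             if canon is not None:
--                 return trimmed[:len(trimmed) - k].strip(), canon
--     return trimmed, None
-- ===== Notes on version B (the rewrite author's own statement) =====
-- stated objective: alternative
-- what changed: A scans the 14-entry suffix list with a case-insensitive endswith per entry; B lowercases once and does one dict lookup of the name's tail per distinct suffix length (6,3,2,1), longest first - correct because among A's suffixes the only nested pairs ('IV'/'V', 'III'/'II') are resolved by A in favour of the longer one.
import Mathlib
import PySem

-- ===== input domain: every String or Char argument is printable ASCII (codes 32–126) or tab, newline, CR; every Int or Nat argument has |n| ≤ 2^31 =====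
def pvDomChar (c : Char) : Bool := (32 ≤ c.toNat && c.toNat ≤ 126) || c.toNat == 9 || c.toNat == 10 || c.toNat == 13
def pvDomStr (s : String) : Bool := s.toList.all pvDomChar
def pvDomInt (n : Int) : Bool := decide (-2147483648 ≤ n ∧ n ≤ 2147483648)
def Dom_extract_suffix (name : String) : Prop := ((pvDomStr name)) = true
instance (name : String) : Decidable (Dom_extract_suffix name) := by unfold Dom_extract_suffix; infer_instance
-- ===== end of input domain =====

-- B replaces A's 14-entry case-insensitive endswith scan by one lower() and one dict lookup
-- of the name's tail per distinct suffix length (longest first); same result, alternative algorithm.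

-- ===== PORT A =====
def pvSuffixesA : List String :=
  ["Junior", "Senior", "Jr.", "Sr.", "III", "IV", "V", "II", "3rd", "4th", "5th", "2nd", "Jr", "Sr"]

def pvLoopA (t : String) : List String → String × Option String
  | [] => (t, none)
  | s :: rest =>
    if PySem.Str.endswith (PySem.Str.lower t) (PySem.Str.lower s) then
      (PySem.Str.strip (PySem.Str.slice t none (some (-(PySem.Str.len s)))), some s)
    else pvLoopA t rest

def extract_suffix (name : String) : String × Option String :=
  if name = "" then ("", none)
  else pvLoopA (PySem.Str.strip name) pvSuffixesA

-- ===== PORT B =====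
def pvSuffixMap : PySem.Dict String String :=
  PySem.Dict.ofList
    [("junior", "Junior"), ("senior", "Senior"),
     ("jr.", "Jr."), ("sr.", "Sr."), ("iii", "III"),
     ("3rd", "3rd"), ("4th", "4th"), ("5th", "5th"), ("2nd", "2nd"),
     ("iv", "IV"), ("ii", "II"), ("jr", "Jr"), ("sr", "Sr"),
     ("v", "V")]

def pvLoopB (trimmed low : String) (n : Int) : List Int → String × Option String
  | [] => (trimmed, none)
  | k :: rest =>
    if k ≤ n then
      match pvSuffixMap.get? (PySem.Str.slice low (some (n - k)) none) with
      | some canon =>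
          (PySem.Str.strip (PySem.Str.slice trimmed none (some (PySem.Str.len trimmed - k))), some canon)
      | none => pvLoopB trimmed low n rest
    else pvLoopB trimmed low n rest

def extract_suffix_alt (name : String) : String × Option String :=
  if name = "" then ("", none)
  else
    let trimmed := PySem.Str.strip name
    let low := PySem.Str.lower trimmed
    pvLoopB trimmed low (PySem.Str.len low) [6, 3, 2, 1]

-- ===== PRECONDITION & SPEC =====
def Spec_extract_suffix (name : String) (out : String × Option String) : Prop := out = extract_suffix_alt name
instance (name : String) (out : String × Option String) : Decidable (Spec_extract_suffix name out) := by unfold Spec_extract_suffix; infer_instance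

-- ===== CLAIM (what is proved, stated in full; the proofs are below) =====
def Claim_equal_extract_suffix : Prop := ∀ (name : String), Dom_extract_suffix name → Spec_extract_suffix name (extract_suffix name)

-- ===== LEMMAS AND PROOFS =====

-- base strings returned by the two programs after a match of length k
def pvBaseA (t : String) (k : Int) : String :=
  PySem.Str.strip (PySem.Str.slice t none (some (-k)))
def pvBaseB (t : String) (k : Int) : String :=
  PySem.Str.strip (PySem.Str.slice t none (some (PySem.Str.len t - k)))

lemma pvSliceStopNeg (xs : List Char) (k : Int) (h0 : 0 < k) (h : k ≤ (xs.length : Int)) :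
    PySem.List.slice xs none (some (-k)) = xs.take (xs.length - k.toNat) := by
  simp [PySem.List.slice, PySem.List.clampIdx]
  split_ifs <;> omega

lemma pvSliceStopSub (xs : List Char) (k : Int) (h0 : 0 ≤ k) (h : k ≤ (xs.length : Int)) :
    PySem.List.slice xs none (some ((xs.length : Int) - k)) = xs.take (xs.length - k.toNat) := by
  simp [PySem.List.slice, PySem.List.clampIdx]
  split_ifs <;> omega

lemma pvBaseEq (t : String) (k : Int) (h0 : 0 < k) (hk : k ≤ (t.toList.length : Int)) :
    pvBaseA t k = pvBaseB t k := by
  unfold pvBaseA pvBaseB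
  congr 1
  apply String.toList_inj.mp
  rw [PySem.Str.toList_slice, PySem.Str.toList_slice, PySem.Chars.slice_eq_listSlice,
      PySem.Chars.slice_eq_listSlice, PySem.Str.len_eq,
      pvSliceStopNeg _ _ h0 hk, pvSliceStopSub _ _ (le_of_lt h0) hk]

lemma pvTail (low : String) (k : Int) (h0 : 0 ≤ k) (hk : k ≤ PySem.Str.len low) :
    (PySem.Str.slice low (some (PySem.Str.len low - k)) none).toList
      = low.toList.drop (low.toList.length - k.toNat) := by
  rw [PySem.Str.len_eq] at hk ⊢
  rw [PySem.Str.toList_slice, PySem.Chars.slice_eq_listSlice,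
      PySem.List.slice_from _ (by omega)]
  congr 1
  omega

lemma pvKeyK (low lit : String) (k : Int) (h0 : 0 ≤ k) (hk : k ≤ PySem.Str.len low) :
    (lit == PySem.Str.slice low (some (PySem.Str.len low - k)) none)
      = (decide (lit.toList.length = k.toNat) && PySem.Chars.endswith low.toList lit.toList) := by
  have hkey := pvTail low k h0 hk
  have hkn : k.toNat ≤ low.toList.length := by
    rw [PySem.Str.len_eq] at hk; omega
  rw [Bool.eq_iff_iff]
  simp only [beq_iff_eq, Bool.and_eq_true, decide_eq_true_eq, PySem.Chars.endswith_iff]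
  constructor
  · intro h
    subst h
    refine ⟨?_, by rw [hkey]; exact List.drop_suffix _ _⟩
    rw [hkey]
    rw [PySem.Str.len_eq] at hk
    have hlt : low.toList.length = low.length := String.length_toList
    simp [List.length_drop]
    omega
  · rintro ⟨hl, hs⟩
    apply String.toList_inj.mp
    rw [hkey, ← hl]
    exact List.suffix_iff_eq_drop.mp hs

lemma pvEshort (low : String) (lit : List Char) (h : low.toList.length < lit.length) :
    PySem.Chars.endswith low.toList lit = false := by
  rw [Bool.eq_false_iff]
  intro hc
  have := ((PySem.Chars.endswith_iff _ _).mp hc).length_le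
  omega

lemma pvLenOf {low : String} {lit : List Char}
    (h : PySem.Chars.endswith low.toList lit = true) : lit.length ≤ low.toList.length :=
  ((PySem.Chars.endswith_iff _ _).mp h).length_le

lemma pvExclE {low : String} (a b : List Char)
    (h1 : PySem.Chars.endswith low.toList a = true)
    (hab : ¬ a <:+ b) (hba : ¬ b <:+ a) :
    PySem.Chars.endswith low.toList b = false := by
  rw [Bool.eq_false_iff]
  intro hc
  rcases List.suffix_or_suffix_of_suffix ((PySem.Chars.endswith_iff _ _).mp h1)
      ((PySem.Chars.endswith_iff _ _).mp hc) with h | h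
  · exact hab h
  · exact hba h

lemma pvSuffixMapEq : pvSuffixMap = PySem.Dict.mk
    [("junior", "Junior"), ("senior", "Senior"),
     ("jr.", "Jr."), ("sr.", "Sr."), ("iii", "III"),
     ("3rd", "3rd"), ("4th", "4th"), ("5th", "5th"), ("2nd", "2nd"),
     ("iv", "IV"), ("ii", "II"), ("jr", "Jr"), ("sr", "Sr"),
     ("v", "V")] := by decide

lemma pvB_unfold (t low : String) (n : Int) (k : Int) (rest : List Int) :
    pvLoopB t low n (k :: rest)
      = if k ≤ n then
          (match pvSuffixMap.get? (PySem.Str.slice low (some (n - k)) none) with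
           | some canon =>
               (PySem.Str.strip (PySem.Str.slice t none (some (PySem.Str.len t - k))), some canon)
           | none => pvLoopB t low n rest)
        else pvLoopB t low n rest := rfl

lemma pvMatch1 {β : Type} (c1 : Bool) (a1 : String) (f : String → β) (g : β) :
    (match (if c1 then some a1 else none) with | some x => f x | none => g)
      = if c1 then f a1 else g := by cases c1 <;> rfl

lemma pvMatch2 {β : Type} (c1 c2 : Bool) (a1 a2 : String) (f : String → β) (g : β) :
    (match (if c1 then some a1 else if c2 then some a2 else none) with | some x => f x | none => g)
      = if c1 then f a1 else if c2 then f a2 else g := by cases c1 <;> cases c2 <;> rfl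

lemma pvMatch4 {β : Type} (c1 c2 c3 c4 : Bool) (a1 a2 a3 a4 : String) (f : String → β) (g : β) :
    (match (if c1 then some a1 else if c2 then some a2 else if c3 then some a3 else
            if c4 then some a4 else none) with | some x => f x | none => g)
      = if c1 then f a1 else if c2 then f a2 else if c3 then f a3 else if c4 then f a4 else g := by
  cases c1 <;> cases c2 <;> cases c3 <;> cases c4 <;> rfl

lemma pvMatch7 {β : Type} (c1 c2 c3 c4 c5 c6 c7 : Bool) (a1 a2 a3 a4 a5 a6 a7 : String)
    (f : String → β) (g : β) :
    (match (if c1 then some a1 else if c2 then some a2 else if c3 then some a3 else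
            if c4 then some a4 else if c5 then some a5 else if c6 then some a6 else
            if c7 then some a7 else none) with | some x => f x | none => g)
      = if c1 then f a1 else if c2 then f a2 else if c3 then f a3 else if c4 then f a4 else
        if c5 then f a5 else if c6 then f a6 else if c7 then f a7 else g := by
  cases c1 <;> cases c2 <;> cases c3 <;> cases c4 <;> cases c5 <;> cases c6 <;> cases c7 <;> rfl

lemma pvGet1 (low : String) (hk : ((1:Int)) ≤ PySem.Str.len low) :
  pvSuffixMap.get? (PySem.Str.slice low (some (PySem.Str.len low - 1)) none)
    =
    if PySem.Chars.endswith low.toList "v".toList then some "V"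
    else none := by
  rw [pvSuffixMapEq]
  simp only [PySem.Dict.get?_mk_cons, fun lit => pvKeyK low lit 1 (by norm_num) hk,
    (show (decide ("junior".toList.length = (1:Int).toNat)) = false from rfl),
    (show (decide ("senior".toList.length = (1:Int).toNat)) = false from rfl),
    (show (decide ("jr.".toList.length = (1:Int).toNat)) = false from rfl),
    (show (decide ("sr.".toList.length = (1:Int).toNat)) = false from rfl),
    (show (decide ("iii".toList.length = (1:Int).toNat)) = false from rfl),
    (show (decide ("3rd".toList.length = (1:Int).toNat)) = false from rfl),
    (show (decide ("4th".toList.length = (1:Int).toNat)) = false from rfl),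
    (show (decide ("5th".toList.length = (1:Int).toNat)) = false from rfl),
    (show (decide ("2nd".toList.length = (1:Int).toNat)) = false from rfl),
    (show (decide ("iv".toList.length = (1:Int).toNat)) = false from rfl),
    (show (decide ("ii".toList.length = (1:Int).toNat)) = false from rfl),
    (show (decide ("jr".toList.length = (1:Int).toNat)) = false from rfl),
    (show (decide ("sr".toList.length = (1:Int).toNat)) = false from rfl),
    (show (decide ("v".toList.length = (1:Int).toNat)) = true from rfl),
    Bool.false_and, Bool.true_and, Bool.false_eq_true, if_false]
  rfl

lemma pvGet2 (low : String) (hk : ((2:Int)) ≤ PySem.Str.len low) :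
  pvSuffixMap.get? (PySem.Str.slice low (some (PySem.Str.len low - 2)) none)
    =
    if PySem.Chars.endswith low.toList "iv".toList then some "IV"
    else if PySem.Chars.endswith low.toList "ii".toList then some "II"
    else if PySem.Chars.endswith low.toList "jr".toList then some "Jr"
    else if PySem.Chars.endswith low.toList "sr".toList then some "Sr"
    else none := by
  rw [pvSuffixMapEq]
  simp only [PySem.Dict.get?_mk_cons, fun lit => pvKeyK low lit 2 (by norm_num) hk,
    (show (decide ("junior".toList.length = (2:Int).toNat)) = false from rfl),
    (show (decide ("senior".toList.length = (2:Int).toNat)) = false from rfl),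
    (show (decide ("jr.".toList.length = (2:Int).toNat)) = false from rfl),
    (show (decide ("sr.".toList.length = (2:Int).toNat)) = false from rfl),
    (show (decide ("iii".toList.length = (2:Int).toNat)) = false from rfl),
    (show (decide ("3rd".toList.length = (2:Int).toNat)) = false from rfl),
    (show (decide ("4th".toList.length = (2:Int).toNat)) = false from rfl),
    (show (decide ("5th".toList.length = (2:Int).toNat)) = false from rfl),
    (show (decide ("2nd".toList.length = (2:Int).toNat)) = false from rfl),
    (show (decide ("iv".toList.length = (2:Int).toNat)) = true from rfl),
    (show (decide ("ii".toList.length = (2:Int).toNat)) = true from rfl),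
    (show (decide ("jr".toList.length = (2:Int).toNat)) = true from rfl),
    (show (decide ("sr".toList.length = (2:Int).toNat)) = true from rfl),
    (show (decide ("v".toList.length = (2:Int).toNat)) = false from rfl),
    Bool.false_and, Bool.true_and, Bool.false_eq_true, if_false]
  rfl

lemma pvGet3 (low : String) (hk : ((3:Int)) ≤ PySem.Str.len low) :
  pvSuffixMap.get? (PySem.Str.slice low (some (PySem.Str.len low - 3)) none)
    =
    if PySem.Chars.endswith low.toList "jr.".toList then some "Jr."
    else if PySem.Chars.endswith low.toList "sr.".toList then some "Sr."
    else if PySem.Chars.endswith low.toList "iii".toList then some "III"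
    else if PySem.Chars.endswith low.toList "3rd".toList then some "3rd"
    else if PySem.Chars.endswith low.toList "4th".toList then some "4th"
    else if PySem.Chars.endswith low.toList "5th".toList then some "5th"
    else if PySem.Chars.endswith low.toList "2nd".toList then some "2nd"
    else none := by
  rw [pvSuffixMapEq]
  simp only [PySem.Dict.get?_mk_cons, fun lit => pvKeyK low lit 3 (by norm_num) hk,
    (show (decide ("junior".toList.length = (3:Int).toNat)) = false from rfl),
    (show (decide ("senior".toList.length = (3:Int).toNat)) = false from rfl),
    (show (decide ("jr.".toList.length = (3:Int).toNat)) = true from rfl),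
    (show (decide ("sr.".toList.length = (3:Int).toNat)) = true from rfl),
    (show (decide ("iii".toList.length = (3:Int).toNat)) = true from rfl),
    (show (decide ("3rd".toList.length = (3:Int).toNat)) = true from rfl),
    (show (decide ("4th".toList.length = (3:Int).toNat)) = true from rfl),
    (show (decide ("5th".toList.length = (3:Int).toNat)) = true from rfl),
    (show (decide ("2nd".toList.length = (3:Int).toNat)) = true from rfl),
    (show (decide ("iv".toList.length = (3:Int).toNat)) = false from rfl),
    (show (decide ("ii".toList.length = (3:Int).toNat)) = false from rfl),
    (show (decide ("jr".toList.length = (3:Int).toNat)) = false from rfl),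
    (show (decide ("sr".toList.length = (3:Int).toNat)) = false from rfl),
    (show (decide ("v".toList.length = (3:Int).toNat)) = false from rfl),
    Bool.false_and, Bool.true_and, Bool.false_eq_true, if_false]
  rfl

lemma pvGet6 (low : String) (hk : ((6:Int)) ≤ PySem.Str.len low) :
  pvSuffixMap.get? (PySem.Str.slice low (some (PySem.Str.len low - 6)) none)
    =
    if PySem.Chars.endswith low.toList "junior".toList then some "Junior"
    else if PySem.Chars.endswith low.toList "senior".toList then some "Senior"
    else none := by
  rw [pvSuffixMapEq]
  simp only [PySem.Dict.get?_mk_cons, fun lit => pvKeyK low lit 6 (by norm_num) hk,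
    (show (decide ("junior".toList.length = (6:Int).toNat)) = true from rfl),
    (show (decide ("senior".toList.length = (6:Int).toNat)) = true from rfl),
    (show (decide ("jr.".toList.length = (6:Int).toNat)) = false from rfl),
    (show (decide ("sr.".toList.length = (6:Int).toNat)) = false from rfl),
    (show (decide ("iii".toList.length = (6:Int).toNat)) = false from rfl),
    (show (decide ("3rd".toList.length = (6:Int).toNat)) = false from rfl),
    (show (decide ("4th".toList.length = (6:Int).toNat)) = false from rfl),
    (show (decide ("5th".toList.length = (6:Int).toNat)) = false from rfl),
    (show (decide ("2nd".toList.length = (6:Int).toNat)) = false from rfl),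
    (show (decide ("iv".toList.length = (6:Int).toNat)) = false from rfl),
    (show (decide ("ii".toList.length = (6:Int).toNat)) = false from rfl),
    (show (decide ("jr".toList.length = (6:Int).toNat)) = false from rfl),
    (show (decide ("sr".toList.length = (6:Int).toNat)) = false from rfl),
    (show (decide ("v".toList.length = (6:Int).toNat)) = false from rfl),
    Bool.false_and, Bool.true_and, Bool.false_eq_true, if_false]
  rfl

-- B-side evaluation, innermost out: pvLoopB over [1], [2,1], [3,2,1], [6,3,2,1]
lemma pvB_eval1 (t low : String) :
    pvLoopB t low (PySem.Str.len low) [1]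
      = if PySem.Chars.endswith low.toList "v".toList then (pvBaseB t 1, some "V")
        else (t, none) := by
  by_cases hg : ((1:Int)) ≤ PySem.Str.len low
  · rw [pvB_unfold, if_pos hg, pvGet1 low hg, pvMatch1]
    simp only [pvLoopB, pvBaseB]
  · rw [pvB_unfold, if_neg hg]
    simp only [pvLoopB]
    rw [pvEshort low "v".toList (by rw [show ("v".toList.length) = 1 from rfl]; rw [PySem.Str.len_eq] at hg; omega)]
    simp

lemma pvB_eval2 (t low : String) :
    pvLoopB t low (PySem.Str.len low) [2, 1]
      = if PySem.Chars.endswith low.toList "iv".toList then (pvBaseB t 2, some "IV")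
        else if PySem.Chars.endswith low.toList "ii".toList then (pvBaseB t 2, some "II")
        else if PySem.Chars.endswith low.toList "jr".toList then (pvBaseB t 2, some "Jr")
        else if PySem.Chars.endswith low.toList "sr".toList then (pvBaseB t 2, some "Sr")
        else if PySem.Chars.endswith low.toList "v".toList then (pvBaseB t 1, some "V")
        else (t, none) := by
  by_cases hg : ((2:Int)) ≤ PySem.Str.len low
  · rw [pvB_unfold, if_pos hg, pvGet2 low hg, pvMatch4]
    rw [pvB_eval1 t low]
    simp only [pvBaseB]
  · rw [pvB_unfold, if_neg hg]
    rw [pvB_eval1 t low]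
    rw [pvEshort low "iv".toList (by rw [show ("iv".toList.length) = 2 from rfl]; rw [PySem.Str.len_eq] at hg; omega)]
    rw [pvEshort low "ii".toList (by rw [show ("ii".toList.length) = 2 from rfl]; rw [PySem.Str.len_eq] at hg; omega)]
    rw [pvEshort low "jr".toList (by rw [show ("jr".toList.length) = 2 from rfl]; rw [PySem.Str.len_eq] at hg; omega)]
    rw [pvEshort low "sr".toList (by rw [show ("sr".toList.length) = 2 from rfl]; rw [PySem.Str.len_eq] at hg; omega)]
    simp

lemma pvB_eval3 (t low : String) :
    pvLoopB t low (PySem.Str.len low) [3, 2, 1]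
      = if PySem.Chars.endswith low.toList "jr.".toList then (pvBaseB t 3, some "Jr.")
        else if PySem.Chars.endswith low.toList "sr.".toList then (pvBaseB t 3, some "Sr.")
        else if PySem.Chars.endswith low.toList "iii".toList then (pvBaseB t 3, some "III")
        else if PySem.Chars.endswith low.toList "3rd".toList then (pvBaseB t 3, some "3rd")
        else if PySem.Chars.endswith low.toList "4th".toList then (pvBaseB t 3, some "4th")
        else if PySem.Chars.endswith low.toList "5th".toList then (pvBaseB t 3, some "5th")
        else if PySem.Chars.endswith low.toList "2nd".toList then (pvBaseB t 3, some "2nd")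
        else if PySem.Chars.endswith low.toList "iv".toList then (pvBaseB t 2, some "IV")
        else if PySem.Chars.endswith low.toList "ii".toList then (pvBaseB t 2, some "II")
        else if PySem.Chars.endswith low.toList "jr".toList then (pvBaseB t 2, some "Jr")
        else if PySem.Chars.endswith low.toList "sr".toList then (pvBaseB t 2, some "Sr")
        else if PySem.Chars.endswith low.toList "v".toList then (pvBaseB t 1, some "V")
        else (t, none) := by
  by_cases hg : ((3:Int)) ≤ PySem.Str.len low
  · rw [pvB_unfold, if_pos hg, pvGet3 low hg, pvMatch7]
    rw [pvB_eval2 t low]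
    simp only [pvBaseB]
  · rw [pvB_unfold, if_neg hg]
    rw [pvB_eval2 t low]
    rw [pvEshort low "jr.".toList (by rw [show ("jr.".toList.length) = 3 from rfl]; rw [PySem.Str.len_eq] at hg; omega)]
    rw [pvEshort low "sr.".toList (by rw [show ("sr.".toList.length) = 3 from rfl]; rw [PySem.Str.len_eq] at hg; omega)]
    rw [pvEshort low "iii".toList (by rw [show ("iii".toList.length) = 3 from rfl]; rw [PySem.Str.len_eq] at hg; omega)]
    rw [pvEshort low "3rd".toList (by rw [show ("3rd".toList.length) = 3 from rfl]; rw [PySem.Str.len_eq] at hg; omega)]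
    rw [pvEshort low "4th".toList (by rw [show ("4th".toList.length) = 3 from rfl]; rw [PySem.Str.len_eq] at hg; omega)]
    rw [pvEshort low "5th".toList (by rw [show ("5th".toList.length) = 3 from rfl]; rw [PySem.Str.len_eq] at hg; omega)]
    rw [pvEshort low "2nd".toList (by rw [show ("2nd".toList.length) = 3 from rfl]; rw [PySem.Str.len_eq] at hg; omega)]
    simp

lemma pvB_eval (t low : String) :
    pvLoopB t low (PySem.Str.len low) [6, 3, 2, 1]
      = if PySem.Chars.endswith low.toList "junior".toList then (pvBaseB t 6, some "Junior")
        else if PySem.Chars.endswith low.toList "senior".toList then (pvBaseB t 6, some "Senior")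
        else if PySem.Chars.endswith low.toList "jr.".toList then (pvBaseB t 3, some "Jr.")
        else if PySem.Chars.endswith low.toList "sr.".toList then (pvBaseB t 3, some "Sr.")
        else if PySem.Chars.endswith low.toList "iii".toList then (pvBaseB t 3, some "III")
        else if PySem.Chars.endswith low.toList "3rd".toList then (pvBaseB t 3, some "3rd")
        else if PySem.Chars.endswith low.toList "4th".toList then (pvBaseB t 3, some "4th")
        else if PySem.Chars.endswith low.toList "5th".toList then (pvBaseB t 3, some "5th")
        else if PySem.Chars.endswith low.toList "2nd".toList then (pvBaseB t 3, some "2nd")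
        else if PySem.Chars.endswith low.toList "iv".toList then (pvBaseB t 2, some "IV")
        else if PySem.Chars.endswith low.toList "ii".toList then (pvBaseB t 2, some "II")
        else if PySem.Chars.endswith low.toList "jr".toList then (pvBaseB t 2, some "Jr")
        else if PySem.Chars.endswith low.toList "sr".toList then (pvBaseB t 2, some "Sr")
        else if PySem.Chars.endswith low.toList "v".toList then (pvBaseB t 1, some "V")
        else (t, none) := by
  by_cases hg : ((6:Int)) ≤ PySem.Str.len low
  · rw [pvB_unfold, if_pos hg, pvGet6 low hg, pvMatch2]
    rw [pvB_eval3 t low]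
    simp only [pvBaseB]
  · rw [pvB_unfold, if_neg hg]
    rw [pvB_eval3 t low]
    rw [pvEshort low "junior".toList (by rw [show ("junior".toList.length) = 6 from rfl]; rw [PySem.Str.len_eq] at hg; omega)]
    rw [pvEshort low "senior".toList (by rw [show ("senior".toList.length) = 6 from rfl]; rw [PySem.Str.len_eq] at hg; omega)]
    simp

lemma pvA_eval (t low : String) (h : low.toList = PySem.Chars.lower t.toList) :
    pvLoopA t pvSuffixesA
      = if PySem.Chars.endswith low.toList "junior".toList then (pvBaseA t 6, some "Junior")
        else if PySem.Chars.endswith low.toList "senior".toList then (pvBaseA t 6, some "Senior")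
        else if PySem.Chars.endswith low.toList "jr.".toList then (pvBaseA t 3, some "Jr.")
        else if PySem.Chars.endswith low.toList "sr.".toList then (pvBaseA t 3, some "Sr.")
        else if PySem.Chars.endswith low.toList "iii".toList then (pvBaseA t 3, some "III")
        else if PySem.Chars.endswith low.toList "iv".toList then (pvBaseA t 2, some "IV")
        else if PySem.Chars.endswith low.toList "v".toList then (pvBaseA t 1, some "V")
        else if PySem.Chars.endswith low.toList "ii".toList then (pvBaseA t 2, some "II")
        else if PySem.Chars.endswith low.toList "3rd".toList then (pvBaseA t 3, some "3rd")
        else if PySem.Chars.endswith low.toList "4th".toList then (pvBaseA t 3, some "4th")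
        else if PySem.Chars.endswith low.toList "5th".toList then (pvBaseA t 3, some "5th")
        else if PySem.Chars.endswith low.toList "2nd".toList then (pvBaseA t 3, some "2nd")
        else if PySem.Chars.endswith low.toList "jr".toList then (pvBaseA t 2, some "Jr")
        else if PySem.Chars.endswith low.toList "sr".toList then (pvBaseA t 2, some "Sr")
        else (t, none) := by
  simp only [pvLoopA, pvSuffixesA, pvBaseA, PySem.Str.endswith_eq, PySem.Str.toList_lower, ← h,
    (show PySem.Str.lower "Junior" = "junior" from rfl),
    (show PySem.Str.len "Junior" = 6 from rfl),
    (show PySem.Str.lower "Senior" = "senior" from rfl),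
    (show PySem.Str.len "Senior" = 6 from rfl),
    (show PySem.Str.lower "Jr." = "jr." from rfl),
    (show PySem.Str.len "Jr." = 3 from rfl),
    (show PySem.Str.lower "Sr." = "sr." from rfl),
    (show PySem.Str.len "Sr." = 3 from rfl),
    (show PySem.Str.lower "III" = "iii" from rfl),
    (show PySem.Str.len "III" = 3 from rfl),
    (show PySem.Str.lower "IV" = "iv" from rfl),
    (show PySem.Str.len "IV" = 2 from rfl),
    (show PySem.Str.lower "V" = "v" from rfl),
    (show PySem.Str.len "V" = 1 from rfl),
    (show PySem.Str.lower "II" = "ii" from rfl),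
    (show PySem.Str.len "II" = 2 from rfl),
    (show PySem.Str.lower "3rd" = "3rd" from rfl),
    (show PySem.Str.len "3rd" = 3 from rfl),
    (show PySem.Str.lower "4th" = "4th" from rfl),
    (show PySem.Str.len "4th" = 3 from rfl),
    (show PySem.Str.lower "5th" = "5th" from rfl),
    (show PySem.Str.len "5th" = 3 from rfl),
    (show PySem.Str.lower "2nd" = "2nd" from rfl),
    (show PySem.Str.len "2nd" = 3 from rfl),
    (show PySem.Str.lower "Jr" = "jr" from rfl),
    (show PySem.Str.len "Jr" = 2 from rfl),
    (show PySem.Str.lower "Sr" = "sr" from rfl),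
    (show PySem.Str.len "Sr" = 2 from rfl)]


lemma pvMain (t low : String) (h : low.toList = PySem.Chars.lower t.toList) :
    pvLoopA t pvSuffixesA = pvLoopB t low (PySem.Str.len low) [6, 3, 2, 1] := by
  have hlen : low.toList.length = t.toList.length := by
    rw [h]; simp [PySem.Chars.lower]
  rw [pvA_eval t low h, pvB_eval t low]
  cases hJun : PySem.Chars.endswith low.toList "junior".toList
  · -- junior: no
    cases hSen : PySem.Chars.endswith low.toList "senior".toList
    · -- senior: no
      cases hJrD : PySem.Chars.endswith low.toList "jr.".toList
      · -- jr.: no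
        cases hSrD : PySem.Chars.endswith low.toList "sr.".toList
        · -- sr.: no
          cases hIII : PySem.Chars.endswith low.toList "iii".toList
          · -- iii: no
            cases hIV : PySem.Chars.endswith low.toList "iv".toList
            · -- iv: no
              cases hV : PySem.Chars.endswith low.toList "v".toList
              · -- v: no
                cases hII : PySem.Chars.endswith low.toList "ii".toList
                · -- ii: no
                  cases h3 : PySem.Chars.endswith low.toList "3rd".toList
                  · -- 3rd: no
                    cases h4 : PySem.Chars.endswith low.toList "4th".toList
                    · -- 4th: no
                      cases h5 : PySem.Chars.endswith low.toList "5th".toList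
                      · -- 5th: no
                        cases h2 : PySem.Chars.endswith low.toList "2nd".toList
                        · -- 2nd: no
                          cases hJr : PySem.Chars.endswith low.toList "jr".toList
                          · -- jr: no
                            cases hSr : PySem.Chars.endswith low.toList "sr".toList
                            · -- sr: no
                              simp [hJun, hSen, hJrD, hSrD, hIII, hIV, hV, hII, h3, h4, h5, h2, hJr, hSr]
                            · -- sr: yes
                              have hl := pvLenOf hSr
                              rw [show ("sr".toList.length) = 2 from rfl] at hl
                              simp [hJun, hSen, hJrD, hSrD, hIII, hIV, hV, hII, h3, h4, h5, h2, hJr, hSr, pvBaseEq t 2 (by norm_num) (by omega)]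
                          · -- jr: yes
                            have hl := pvLenOf hJr
                            rw [show ("jr".toList.length) = 2 from rfl] at hl
                            simp [hJun, hSen, hJrD, hSrD, hIII, hIV, hV, hII, h3, h4, h5, h2, hJr, pvBaseEq t 2 (by norm_num) (by omega)]
                        · -- 2nd: yes
                          have hl := pvLenOf h2
                          rw [show ("2nd".toList.length) = 3 from rfl] at hl
                          simp [hJun, hSen, hJrD, hSrD, hIII, hIV, hV, hII, h3, h4, h5, h2, pvBaseEq t 3 (by norm_num) (by omega)]
                      · -- 5th: yes
                        have hl := pvLenOf h5
                        rw [show ("5th".toList.length) = 3 from rfl] at hl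
                        simp [hJun, hSen, hJrD, hSrD, hIII, hIV, hV, hII, h3, h4, h5, pvBaseEq t 3 (by norm_num) (by omega)]
                    · -- 4th: yes
                      have hl := pvLenOf h4
                      rw [show ("4th".toList.length) = 3 from rfl] at hl
                      simp [hJun, hSen, hJrD, hSrD, hIII, hIV, hV, hII, h3, h4, pvBaseEq t 3 (by norm_num) (by omega)]
                  · -- 3rd: yes
                    have hl := pvLenOf h3
                    rw [show ("3rd".toList.length) = 3 from rfl] at hl
                    simp [hJun, hSen, hJrD, hSrD, hIII, hIV, hV, hII, h3, pvBaseEq t 3 (by norm_num) (by omega)]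
                · -- ii: yes
                  have hl := pvLenOf hII
                  rw [show ("ii".toList.length) = 2 from rfl] at hl
                  have ex0 : PySem.Chars.endswith low.toList ['3', 'r', 'd'] = false :=
                    pvExclE "ii".toList "3rd".toList hII (by decide) (by decide)
                  have ex1 : PySem.Chars.endswith low.toList ['4', 't', 'h'] = false :=
                    pvExclE "ii".toList "4th".toList hII (by decide) (by decide)
                  have ex2 : PySem.Chars.endswith low.toList ['5', 't', 'h'] = false :=
                    pvExclE "ii".toList "5th".toList hII (by decide) (by decide)
                  have ex3 : PySem.Chars.endswith low.toList ['2', 'n', 'd'] = false :=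
                    pvExclE "ii".toList "2nd".toList hII (by decide) (by decide)
                  simp [hJun, hSen, hJrD, hSrD, hIII, hIV, hV, hII, ex0, ex1, ex2, ex3, pvBaseEq t 2 (by norm_num) (by omega)]
              · -- v: yes
                have hl := pvLenOf hV
                rw [show ("v".toList.length) = 1 from rfl] at hl
                have ex0 : PySem.Chars.endswith low.toList ['3', 'r', 'd'] = false :=
                  pvExclE "v".toList "3rd".toList hV (by decide) (by decide)
                have ex1 : PySem.Chars.endswith low.toList ['4', 't', 'h'] = false :=
                  pvExclE "v".toList "4th".toList hV (by decide) (by decide)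
                have ex2 : PySem.Chars.endswith low.toList ['5', 't', 'h'] = false :=
                  pvExclE "v".toList "5th".toList hV (by decide) (by decide)
                have ex3 : PySem.Chars.endswith low.toList ['2', 'n', 'd'] = false :=
                  pvExclE "v".toList "2nd".toList hV (by decide) (by decide)
                have ex4 : PySem.Chars.endswith low.toList ['i', 'i'] = false :=
                  pvExclE "v".toList "ii".toList hV (by decide) (by decide)
                have ex5 : PySem.Chars.endswith low.toList ['j', 'r'] = false :=
                  pvExclE "v".toList "jr".toList hV (by decide) (by decide)
                have ex6 : PySem.Chars.endswith low.toList ['s', 'r'] = false :=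
                  pvExclE "v".toList "sr".toList hV (by decide) (by decide)
                simp [hJun, hSen, hJrD, hSrD, hIII, hIV, hV, ex0, ex1, ex2, ex3, ex4, ex5, ex6, pvBaseEq t 1 (by norm_num) (by omega)]
            · -- iv: yes
              have hl := pvLenOf hIV
              rw [show ("iv".toList.length) = 2 from rfl] at hl
              have ex0 : PySem.Chars.endswith low.toList ['3', 'r', 'd'] = false :=
                pvExclE "iv".toList "3rd".toList hIV (by decide) (by decide)
              have ex1 : PySem.Chars.endswith low.toList ['4', 't', 'h'] = false :=
                pvExclE "iv".toList "4th".toList hIV (by decide) (by decide)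
              have ex2 : PySem.Chars.endswith low.toList ['5', 't', 'h'] = false :=
                pvExclE "iv".toList "5th".toList hIV (by decide) (by decide)
              have ex3 : PySem.Chars.endswith low.toList ['2', 'n', 'd'] = false :=
                pvExclE "iv".toList "2nd".toList hIV (by decide) (by decide)
              simp [hJun, hSen, hJrD, hSrD, hIII, hIV, ex0, ex1, ex2, ex3, pvBaseEq t 2 (by norm_num) (by omega)]
          · -- iii: yes
            have hl := pvLenOf hIII
            rw [show ("iii".toList.length) = 3 from rfl] at hl
            simp [hJun, hSen, hJrD, hSrD, hIII, pvBaseEq t 3 (by norm_num) (by omega)]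
        · -- sr.: yes
          have hl := pvLenOf hSrD
          rw [show ("sr.".toList.length) = 3 from rfl] at hl
          simp [hJun, hSen, hJrD, hSrD, pvBaseEq t 3 (by norm_num) (by omega)]
      · -- jr.: yes
        have hl := pvLenOf hJrD
        rw [show ("jr.".toList.length) = 3 from rfl] at hl
        simp [hJun, hSen, hJrD, pvBaseEq t 3 (by norm_num) (by omega)]
    · -- senior: yes
      have hl := pvLenOf hSen
      rw [show ("senior".toList.length) = 6 from rfl] at hl
      simp [hJun, hSen, pvBaseEq t 6 (by norm_num) (by omega)]
  · -- junior: yes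
    have hl := pvLenOf hJun
    rw [show ("junior".toList.length) = 6 from rfl] at hl
    simp [hJun, pvBaseEq t 6 (by norm_num) (by omega)]

-- ===== VERDICT (by name: the statement is the Claim_ definition above) =====
theorem extract_suffix_spec : Claim_equal_extract_suffix := by
  intro name _
  unfold Spec_extract_suffix extract_suffix extract_suffix_alt
  by_cases h : name = ""
  · rw [if_pos h, if_pos h]
  · rw [if_neg h, if_neg h]
    exact pvMain _ _ (PySem.Str.toList_lower _)
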